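-- pv_equiv track=rewrite | github.com/selenaavci/quiz-generator-agent | generator.py | build_type_plan
-- ===== SOURCE A (Python) =====
-- from typing import Any, Dict, List, Optional, Tuple, Union
--
-- def build_type_plan(mcq: int, tf: int, fill: int) -> List[str]:
--     if mcq < 0 or tf < 0 or fill < 0:
--         raise ValueError("Soru sayıları negatif olamaz.")
--
--     counts = {"mcq": mcq, "tf": tf, "fill": fill}
--     if not sum(counts.values()):
--         return []
--
--     priority = {"mcq": 3, "tf": 2, "fill": 1}
--     order: List[str] = []
--     while sum(counts.values()) > 0:
--         best = max(counts.keys(), key=lambda k: (counts[k], priority[k]))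
--         if counts[best] > 0:
--             order.append(best)
--             counts[best] -= 1
--             continue
--         for k in ("mcq", "tf", "fill"):
--             if counts[k] > 0:
--                 order.append(k)
--                 counts[k] -= 1
--                 break
--     return order
-- ===== SOURCE B (Python) =====
-- def _phases(mcq, tf, fill):
--     # Stable 3-element sort by count descending (input order already encodes
--     # priority mcq > tf > fill, so ties keep priority order), then emit three
--     # phases: the top type alone until it meets the second count, the top two
--     # alternating in priority order until they meet the third, then all three
--     # cycling in priority order.
--     a, b, c = ("mcq", mcq), ("tf", tf), ("fill", fill)
--     if b[1] > a[1]: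
--         a, b = b, a
--     if c[1] > b[1]:
--         b, c = c, b
--     if b[1] > a[1]:
--         a, b = b, a
--     (n1, x1), (n2, x2), (n3, x3) = a, b, c
--     prio = {"mcq": 3, "tf": 2, "fill": 1}
--     hi, lo = (n1, n2) if prio[n1] > prio[n2] else (n2, n1)
--     return [n1] * (x1 - x2) + [hi, lo] * (x2 - x3) + ["mcq", "tf", "fill"] * x3
--
--
-- def build_type_plan(mcq, tf, fill):
--     if mcq < 0 or tf < 0 or fill < 0:
--         raise ValueError("Soru sayıları negatif olamaz.")
--     return _phases(mcq, tf, fill)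
-- ===== Notes on version B (the rewrite author's own statement) =====
-- stated objective: faster
-- what changed: Replaces the per-item loop (each iteration re-summing the dict and re-scanning for the max) with a closed form: a stable 3-element sort by count plus three list-repetition phases (top alone, top two alternating, all three cycling).
-- outside the precondition, e.g. on build_type_plan(-1, 0, 0): A raises ValueError, B raises ValueError
import Mathlib
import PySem

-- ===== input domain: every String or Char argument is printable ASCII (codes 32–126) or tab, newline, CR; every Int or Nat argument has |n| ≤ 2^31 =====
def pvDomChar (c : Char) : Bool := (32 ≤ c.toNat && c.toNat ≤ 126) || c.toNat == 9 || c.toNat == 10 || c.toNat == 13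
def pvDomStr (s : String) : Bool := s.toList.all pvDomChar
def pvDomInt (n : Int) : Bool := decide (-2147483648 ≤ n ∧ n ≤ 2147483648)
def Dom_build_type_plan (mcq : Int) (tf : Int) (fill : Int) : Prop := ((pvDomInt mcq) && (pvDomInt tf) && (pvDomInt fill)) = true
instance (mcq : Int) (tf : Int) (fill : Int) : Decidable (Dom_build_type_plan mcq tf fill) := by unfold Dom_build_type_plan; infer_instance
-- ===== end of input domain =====

-- B replaces A's per-item greedy loop by a closed form (stable 3-way sort by count,
-- then three list-repetition phases); equivalence is proved for nonnegative counts
-- (on negative counts the Python raises ValueError, excluded by Pre_).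

-- ===== PORT A =====
-- priority = {"mcq": 3, "tf": 2, "fill": 1}
def pvPrio (k : String) : Int := if k = "mcq" then 3 else if k = "tf" then 2 else 1

-- counts[k] for the running counts dict {"mcq": m, "tf": t, "fill": f}
def pvCount (m t f : Int) (k : String) : Int :=
  if k = "mcq" then m else if k = "tf" then t else f

-- max(counts.keys(), key=lambda k: (counts[k], priority[k])): scan the keys in
-- order, replacing the running best only when the key tuple is strictly greater
def pvBest (m t f : Int) : String :=
  let b1 := "mcq"
  let b2 := if pvCount m t f "tf" > pvCount m t f b1 ∨
               (pvCount m t f "tf" = pvCount m t f b1 ∧ pvPrio "tf" > pvPrio b1)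
            then "tf" else b1
  if pvCount m t f "fill" > pvCount m t f b2 ∨
     (pvCount m t f "fill" = pvCount m t f b2 ∧ pvPrio "fill" > pvPrio b2)
  then "fill" else b2

-- the while-loop, one constructor step per iteration; fuel = the initial total
-- (on the admitted inputs the loop removes exactly one item per iteration)
def pvAloop : Nat → Int → Int → Int → List String
  | 0, _, _, _ => []
  | n+1, m, t, f =>
    if m + t + f > 0 then
      let best := pvBest m t f
      if pvCount m t f best > 0 then
        if best = "mcq" then "mcq" :: pvAloop n (m-1) t f
        else if best = "tf" then "tf" :: pvAloop n m (t-1) f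
        else "fill" :: pvAloop n m t (f-1)
      else
        -- for k in ("mcq", "tf", "fill"): first positive count (unreachable on admitted inputs)
        if m > 0 then "mcq" :: pvAloop n (m-1) t f
        else if t > 0 then "tf" :: pvAloop n m (t-1) f
        else if f > 0 then "fill" :: pvAloop n m t (f-1)
        else pvAloop n m t f
    else []

def build_type_plan (mcq : Int) (tf : Int) (fill : Int) : List String :=
  if mcq < 0 ∨ tf < 0 ∨ fill < 0 then []   -- Python raises ValueError here; outside Pre_
  else if mcq + tf + fill = 0 then []
  else pvAloop (mcq + tf + fill).toNat mcq tf fill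

-- ===== PORT B =====
-- _phases: stable 3-element sort by count descending, then three repetition phases
def pvPhases (m t f : Int) : List String :=
  let a : String × Int := ("mcq", m)
  let b : String × Int := ("tf", t)
  let c : String × Int := ("fill", f)
  let ab := if b.2 > a.2 then (b, a) else (a, b)
  let bc := if c.2 > ab.2.2 then (c, ab.2) else (ab.2, c)
  let fin := if bc.1.2 > ab.1.2 then (bc.1, ab.1) else (ab.1, bc.1)
  let n1 := fin.1.1
  let x1 := fin.1.2
  let n2 := fin.2.1
  let x2 := fin.2.2
  let x3 := bc.2.2
  let hl := if pvPrio n1 > pvPrio n2 then (n1, n2) else (n2, n1)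
  PySem.List.pyRepeat [n1] (x1 - x2) ++
    PySem.List.pyRepeat [hl.1, hl.2] (x2 - x3) ++
    PySem.List.pyRepeat ["mcq", "tf", "fill"] x3

def build_type_plan_alt (mcq : Int) (tf : Int) (fill : Int) : List String :=
  if mcq < 0 ∨ tf < 0 ∨ fill < 0 then []   -- Python raises ValueError here; outside Pre_
  else pvPhases mcq tf fill

-- ===== PRECONDITION & SPEC =====
-- Pre_ excludes exactly the inputs with a negative count, on which A raises ValueError.
def Pre_build_type_plan (mcq : Int) (tf : Int) (fill : Int) : Prop :=
  0 ≤ mcq ∧ 0 ≤ tf ∧ 0 ≤ fill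
instance (mcq : Int) (tf : Int) (fill : Int) : Decidable (Pre_build_type_plan mcq tf fill) := by
  unfold Pre_build_type_plan; infer_instance

def pvWitness_build_type_plan : Int × Int × Int := (2, 1, 0)

def Spec_build_type_plan (mcq : Int) (tf : Int) (fill : Int) (out : List String) : Prop := out = build_type_plan_alt mcq tf fill
instance (mcq : Int) (tf : Int) (fill : Int) (out : List String) : Decidable (Spec_build_type_plan mcq tf fill out) := by unfold Spec_build_type_plan; infer_instance

-- ===== CLAIM (what is proved, stated in full; the proofs are below) =====
def Claim_equal_build_type_plan : Prop := ∀ (mcq : Int) (tf : Int) (fill : Int), Dom_build_type_plan mcq tf fill → Pre_build_type_plan mcq tf fill → Spec_build_type_plan mcq tf fill (build_type_plan mcq tf fill)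

-- ===== LEMMAS AND PROOFS =====

def pvCanon (m t f : Int) : List String :=
  if t > m then
    if f > m then
      if f > t then
        PySem.List.pyRepeat ["fill"] (f - t) ++ PySem.List.pyRepeat ["tf", "fill"] (t - m) ++ PySem.List.pyRepeat ["mcq", "tf", "fill"] m
      else
        PySem.List.pyRepeat ["tf"] (t - f) ++ PySem.List.pyRepeat ["tf", "fill"] (f - m) ++ PySem.List.pyRepeat ["mcq", "tf", "fill"] m
    else
      PySem.List.pyRepeat ["tf"] (t - m) ++ PySem.List.pyRepeat ["mcq", "tf"] (m - f) ++ PySem.List.pyRepeat ["mcq", "tf", "fill"] f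
  else
    if f > t then
      if f > m then
        PySem.List.pyRepeat ["fill"] (f - m) ++ PySem.List.pyRepeat ["mcq", "fill"] (m - t) ++ PySem.List.pyRepeat ["mcq", "tf", "fill"] t
      else
        PySem.List.pyRepeat ["mcq"] (m - f) ++ PySem.List.pyRepeat ["mcq", "fill"] (f - t) ++ PySem.List.pyRepeat ["mcq", "tf", "fill"] t
    else
      PySem.List.pyRepeat ["mcq"] (m - t) ++ PySem.List.pyRepeat ["mcq", "tf"] (t - f) ++ PySem.List.pyRepeat ["mcq", "tf", "fill"] f

theorem phases_canon (m t f : Int) : pvPhases m t f = pvCanon m t f := by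
  unfold pvPhases pvCanon
  by_cases c1 : t > m <;> by_cases c2 : f > m <;> by_cases c3 : f > t <;>
    simp [c1, c2, c3, pvPrio] <;> first | omega | (rw [if_neg (by omega)]; simp)

theorem pyRepeat_nonpos {α : Type} (xs : List α) (k : Int) (h : k ≤ 0) :
    PySem.List.pyRepeat xs k = [] := by
  simp [PySem.List.pyRepeat, Int.toNat_of_nonpos h]
theorem pyRepeat_peel {α : Type} (xs : List α) (k : Int) (h : 0 < k) :
    PySem.List.pyRepeat xs k = xs ++ PySem.List.pyRepeat xs (k - 1) := by
  have hk : k.toNat = (k - 1).toNat + 1 := by omega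
  unfold PySem.List.pyRepeat
  rw [hk, List.replicate_succ, List.flatten_cons]

theorem step_mcq (m t f : Int) (h1 : t ≤ m) (h2 : f ≤ m)
    (hm : 0 < m) : pvCanon m t f = "mcq" :: pvCanon (m - 1) t f := by
  unfold pvCanon
  split_ifs <;> try omega
  · -- f = m, t < m
    rw [pyRepeat_nonpos ["mcq"] (m - f) (by omega),
        pyRepeat_peel ["mcq", "fill"] (f - t) (by omega),
        pyRepeat_peel ["fill"] (f - (m - 1)) (by omega),
        pyRepeat_nonpos ["fill"] (f - (m - 1) - 1) (by omega),
        show f - t - 1 = m - 1 - t from by omega]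
    simp
  · -- t < f < m
    rw [pyRepeat_peel ["mcq"] (m - f) (by omega),
        show m - f - 1 = m - 1 - f from by omega]
    simp
  · -- t = f = m
    rw [pyRepeat_nonpos ["mcq"] (m - t) (by omega),
        pyRepeat_nonpos ["mcq", "tf"] (t - f) (by omega),
        pyRepeat_peel ["mcq", "tf", "fill"] f (by omega),
        pyRepeat_nonpos ["tf"] (t - f) (by omega),
        pyRepeat_peel ["tf", "fill"] (f - (m - 1)) (by omega),
        pyRepeat_nonpos ["tf", "fill"] (f - (m - 1) - 1) (by omega),
        show f - 1 = m - 1 from by omega]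
    simp
  · -- t = m, f < m
    rw [pyRepeat_nonpos ["mcq"] (m - t) (by omega),
        pyRepeat_peel ["mcq", "tf"] (t - f) (by omega),
        pyRepeat_peel ["tf"] (t - (m - 1)) (by omega),
        pyRepeat_nonpos ["tf"] (t - (m - 1) - 1) (by omega),
        show t - f - 1 = m - 1 - f from by omega]
    simp
  · -- f ≤ t < m
    rw [pyRepeat_peel ["mcq"] (m - t) (by omega),
        show m - t - 1 = m - 1 - t from by omega]
    simp

theorem step_tf (m t f : Int) (h1 : m < t) (h2 : f ≤ t) :
    pvCanon m t f = "tf" :: pvCanon m (t - 1) f := by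
  unfold pvCanon
  split_ifs <;> try omega
  · -- f = t, m < t - 1
    rw [pyRepeat_nonpos ["tf"] (t - f) (by omega),
        pyRepeat_peel ["tf", "fill"] (f - m) (by omega),
        pyRepeat_peel ["fill"] (f - (t - 1)) (by omega),
        pyRepeat_nonpos ["fill"] (f - (t - 1) - 1) (by omega),
        show f - m - 1 = t - 1 - m from by omega]
    simp
  · -- m < f < t
    rw [pyRepeat_peel ["tf"] (t - f) (by omega),
        show t - f - 1 = t - 1 - f from by omega]
    simp
  · -- f = t, m = t - 1
    rw [pyRepeat_nonpos ["tf"] (t - f) (by omega),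
        pyRepeat_peel ["tf", "fill"] (f - m) (by omega),
        pyRepeat_nonpos ["tf", "fill"] (f - m - 1) (by omega),
        pyRepeat_peel ["fill"] (f - m) (by omega),
        pyRepeat_nonpos ["fill"] (f - m - 1) (by omega),
        pyRepeat_nonpos ["mcq", "fill"] (m - (t - 1)) (by omega),
        show t - 1 = m from by omega]
    simp
  · -- f ≤ m < t - 1
    rw [pyRepeat_peel ["tf"] (t - m) (by omega),
        show t - m - 1 = t - 1 - m from by omega]
    simp
  · -- f ≤ m = t - 1
    rw [pyRepeat_peel ["tf"] (t - m) (by omega),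
        pyRepeat_nonpos ["tf"] (t - m - 1) (by omega),
        pyRepeat_nonpos ["mcq"] (m - (t - 1)) (by omega),
        show m - f = t - 1 - f from by omega]
    simp

theorem step_fill (m t f : Int) (h1 : m < f) (h2 : t < f) :
    pvCanon m t f = "fill" :: pvCanon m t (f - 1) := by
  unfold pvCanon
  split_ifs <;> try omega
  · -- m < t < f - 1
    rw [pyRepeat_peel ["fill"] (f - t) (by omega),
        show f - t - 1 = f - 1 - t from by omega]
    simp
  · -- m < t = f - 1
    rw [pyRepeat_peel ["fill"] (f - t) (by omega),
        pyRepeat_nonpos ["fill"] (f - t - 1) (by omega),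
        pyRepeat_nonpos ["tf"] (t - (f - 1)) (by omega),
        show t - m = f - 1 - m from by omega]
    simp
  · -- t ≤ m < f - 1
    rw [pyRepeat_peel ["fill"] (f - m) (by omega),
        show f - m - 1 = f - 1 - m from by omega]
    simp
  · -- t < m = f - 1
    rw [pyRepeat_peel ["fill"] (f - m) (by omega),
        pyRepeat_nonpos ["fill"] (f - m - 1) (by omega),
        pyRepeat_nonpos ["mcq"] (m - (f - 1)) (by omega),
        show m - t = f - 1 - t from by omega]
    simp
  · -- m = t = f - 1
    rw [pyRepeat_peel ["fill"] (f - m) (by omega),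
        pyRepeat_nonpos ["fill"] (f - m - 1) (by omega),
        pyRepeat_nonpos ["mcq", "fill"] (m - t) (by omega),
        pyRepeat_nonpos ["mcq"] (m - t) (by omega),
        pyRepeat_nonpos ["mcq", "tf"] (t - (f - 1)) (by omega),
        show f - 1 = t from by omega]
    simp

theorem best_mcq (m t f : Int) (h1 : t ≤ m) (h2 : f ≤ m) : pvBest m t f = "mcq" := by
  simp only [pvBest, pvCount, pvPrio]
  simp only [reduceIte, String.reduceEq]
  split_ifs <;> first | rfl | omega | simp_all

theorem best_tf (m t f : Int) (h1 : m < t) (h2 : f ≤ t) : pvBest m t f = "tf" := by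
  simp only [pvBest, pvCount, pvPrio]
  simp only [reduceIte, String.reduceEq]
  split_ifs <;> first | rfl | omega | simp_all

theorem best_fill (m t f : Int) (h1 : m < f) (h2 : t < f) : pvBest m t f = "fill" := by
  simp only [pvBest, pvCount, pvPrio]
  simp only [reduceIte, String.reduceEq]
  split_ifs <;> first | rfl | omega | simp_all

theorem aloop_canon : ∀ (n : Nat) (m t f : Int), 0 ≤ m → 0 ≤ t → 0 ≤ f →
    m + t + f = (n : Int) → pvAloop n m t f = pvCanon m t f := by
  intro n
  induction n with
  | zero =>
    intro m t f hm ht hf hs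
    have hm0 : m = 0 := by omega
    have ht0 : t = 0 := by omega
    have hf0 : f = 0 := by omega
    subst hm0; subst ht0; subst hf0
    decide
  | succ n ih =>
    intro m t f hm ht hf hs
    have hpos : m + t + f > 0 := by omega
    by_cases hA : t ≤ m ∧ f ≤ m
    · have hb := best_mcq m t f hA.1 hA.2
      have hmpos : 0 < m := by omega
      simp only [pvAloop, if_pos hpos, hb]
      simp only [pvCount]
      simp only [reduceIte, String.reduceEq]
      rw [if_pos hmpos, ih (m - 1) t f (by omega) ht hf (by omega)]
      exact (step_mcq m t f hA.1 hA.2 hmpos).symm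
    · by_cases hB : m < t ∧ f ≤ t
      · have hb := best_tf m t f hB.1 hB.2
        have htpos : 0 < t := by omega
        simp only [pvAloop, if_pos hpos, hb]
        simp only [pvCount]
        simp only [reduceIte, String.reduceEq]
        rw [if_pos htpos, ih m (t - 1) f hm (by omega) hf (by omega)]
        exact (step_tf m t f hB.1 hB.2).symm
      · have hC : m < f ∧ t < f := by omega
        have hb := best_fill m t f hC.1 hC.2
        have hfpos : 0 < f := by omega
        simp only [pvAloop, if_pos hpos, hb]
        simp only [pvCount]
        simp only [reduceIte, String.reduceEq]
        rw [if_pos hfpos, ih m t (f - 1) hm ht (by omega) (by omega)]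
        exact (step_fill m t f hC.1 hC.2).symm

-- ===== VERDICT (by name: the statement is the Claim_ definition above) =====
theorem build_type_plan_spec : Claim_equal_build_type_plan := by
  intro m t f _ hpre
  obtain ⟨hm, ht, hf⟩ := hpre
  unfold Spec_build_type_plan build_type_plan build_type_plan_alt
  rw [if_neg (show ¬(m < 0 ∨ t < 0 ∨ f < 0) from by omega)]
  rw [if_neg (show ¬(m < 0 ∨ t < 0 ∨ f < 0) from by omega)]
  by_cases hz : m + t + f = 0
  · rw [if_pos hz]
    have hm0 : m = 0 := by omega
    have ht0 : t = 0 := by omega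
    have hf0 : f = 0 := by omega
    subst hm0; subst ht0; subst hf0
    decide
  · rw [if_neg hz, aloop_canon (m + t + f).toNat m t f hm ht hf (by omega), phases_canon]
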